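-- pv_equiv track=rewrite | github.com/nekrut/gxy-sketches | scripts/classify_and_mine.py | filter_dominated
-- ===== SOURCE A (Python) =====
-- def filter_dominated(motifs):
--     """Drop motifs that are strict subsequences of an equally-supported larger motif."""
--     by_support_len = sorted(motifs, key=lambda x: (-len(x[1]), -len(x[0])))
--     keep = []
--     for gram, labels in by_support_len:
--         dominated = False
--         for g2, l2 in keep:
--             if len(l2) >= len(labels) and len(g2) > len(gram) and is_subseq(gram, g2):
--                 dominated = True
--                 break
--         if not dominated:
--             keep.append((gram, labels))
--     return keep
--
-- def is_subseq(short, long_):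
--     i = 0
--     for x in long_:
--         if i < len(short) and x == short[i]:
--             i += 1
--     return i == len(short)
-- ===== SOURCE B (Python) =====
-- def filter_dominated(motifs):
--     """Drop motifs that are strict subsequences of an equally-supported larger motif."""
--     s = sorted(motifs, key=lambda x: (-len(x[1]), -len(x[0])))
--     return [m for m in s if not any(_covers(n, m) for n in s)]
--
-- def _covers(n, m):
--     if len(n[1]) >= len(m[1]) and len(n[0]) > len(m[0]):
--         return _subseq(m[0], n[0])
--     return False
--
-- def _subseq(short, long_):
--     if not short:
--         return True
--     if not long_:
--         return False
--     if long_[0] == short[0]: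
--         return _subseq(short[1:], long_[1:])
--     return _subseq(short, long_[1:])
-- ===== Notes on version B (the rewrite author's own statement) =====
-- stated objective: alternative
-- what changed: Replaces A's incremental keep-accumulator loop (each motif tested only against previously kept motifs, with an index-pointer subsequence scan) by a single filter pass testing each motif against the whole sorted list with a recursive structural subsequence test; equivalence rests on transitivity of subsequence domination and the sort order.
import Mathlib
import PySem

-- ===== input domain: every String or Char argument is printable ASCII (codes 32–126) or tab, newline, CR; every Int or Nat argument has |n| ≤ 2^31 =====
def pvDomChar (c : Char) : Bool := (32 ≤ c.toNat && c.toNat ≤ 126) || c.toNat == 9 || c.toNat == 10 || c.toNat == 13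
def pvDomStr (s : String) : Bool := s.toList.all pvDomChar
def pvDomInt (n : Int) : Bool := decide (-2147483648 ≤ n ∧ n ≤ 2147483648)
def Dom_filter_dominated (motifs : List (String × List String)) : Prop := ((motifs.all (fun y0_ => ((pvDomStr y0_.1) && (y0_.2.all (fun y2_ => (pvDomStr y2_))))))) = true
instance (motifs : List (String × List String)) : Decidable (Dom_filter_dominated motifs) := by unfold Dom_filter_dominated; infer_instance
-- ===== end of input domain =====

-- B replaces A's incremental keep-accumulator loop (pointer-scan subsequence test against
-- previously kept motifs) by one filter pass over the whole sorted list with a recursive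
-- structural subsequence test (objective: alternative); same return value proved below.

-- ===== PORT A =====
-- is_subseq: fold over long_ with pointer i into short (the guarded short[i] is exact:
-- Python only reads short[i] under i < len(short)).
def isSubseqStep (short : List Char) (i : Nat) (x : Char) : Nat :=
  if i < short.length ∧ x = short.getD i ' ' then i + 1 else i

def isSubseq (short long : List Char) : Bool :=
  decide (long.foldl (isSubseqStep short) 0 = short.length)

-- the inner condition `len(l2) >= len(labels) and len(g2) > len(gram) and is_subseq(gram, g2)`
def dominates (n m : String × List String) : Bool :=
  decide (m.2.length ≤ n.2.length) && decide (m.1.toList.length < n.1.toList.length)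
    && isSubseq m.1.toList n.1.toList

def filter_dominated (motifs : List (String × List String)) : List (String × List String) :=
  let by_support_len := PySem.List.sorted2 motifs
      (fun x => -(x.2.length : Int)) (fun x => -(x.1.toList.length : Int))
  by_support_len.foldl
    (fun keep m => if keep.any (fun n => dominates n m) then keep else keep ++ [m]) []

-- ===== PORT B =====
-- _subseq: structural recursion on the two strands, exactly Source B's three cases
def subseqB : List Char → List Char → Bool
  | [], _ => true
  | _ :: _, [] => false
  | a :: s, b :: l => if b = a then subseqB s l else subseqB (a :: s) l

-- _covers: the guarded length test, then the recursive subsequence test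
def coversB (n m : String × List String) : Bool :=
  if m.2.length ≤ n.2.length ∧ m.1.toList.length < n.1.toList.length then
    subseqB m.1.toList n.1.toList
  else
    false

def filter_dominated_alt (motifs : List (String × List String)) : List (String × List String) :=
  let s := PySem.List.sorted2 motifs
      (fun x => -(x.2.length : Int)) (fun x => -(x.1.toList.length : Int))
  s.filter (fun m => !(s.any (fun n => coversB n m)))

-- ===== PRECONDITION & SPEC =====
def Spec_filter_dominated (motifs : List (String × List String)) (out : List (String × List String)) : Prop := out = filter_dominated_alt motifs
instance (motifs : List (String × List String)) (out : List (String × List String)) : Decidable (Spec_filter_dominated motifs out) := by unfold Spec_filter_dominated; infer_instance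

-- ===== CLAIM (what is proved, stated in full; the proofs are below) =====
def Claim_equal_filter_dominated : Prop := ∀ (motifs : List (String × List String)), Dom_filter_dominated motifs → Spec_filter_dominated motifs (filter_dominated motifs)

-- ===== LEMMAS AND PROOFS =====

-- the strict comparison sorted2 uses on the key (-len labels, -len gram)
def ltM (a b : String × List String) : Bool :=
  decide ((-(a.2.length : Int)) < -(b.2.length : Int)) ||
    (!decide ((-(b.2.length : Int)) < -(a.2.length : Int)) &&
      decide ((-(a.1.toList.length : Int)) < -(b.1.toList.length : Int)))

def nlt (a b : String × List String) : Prop := ltM b a = false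

def good (S : List (String × List String)) (m : String × List String) : Bool :=
  !(S.any (fun n => dominates n m))

lemma ltM_iff (a b : String × List String) :
    ltM a b = true ↔ (b.2.length < a.2.length ∨
      (a.2.length = b.2.length ∧ b.1.toList.length < a.1.toList.length)) := by
  simp [ltM]; omega

lemma ltM_eq_false_iff (a b : String × List String) :
    ltM a b = false ↔ ¬ (b.2.length < a.2.length ∨
      (a.2.length = b.2.length ∧ b.1.toList.length < a.1.toList.length)) := by
  rw [← ltM_iff]; simp

lemma sorted2_eq (xs : List (String × List String)) :
    PySem.List.sorted2 xs (fun x => -(x.2.length : Int)) (fun x => -(x.1.toList.length : Int))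
      = xs.foldl (fun acc x => PySem.List.insertBy ltM x acc) [] := rfl

lemma insertBy_cons {α : Type} (before : α → α → Bool) (x y : α) (ys : List α) :
    PySem.List.insertBy before x (y :: ys)
      = if before x y then x :: y :: ys else y :: PySem.List.insertBy before x ys := rfl

lemma pairwise_insertBy (x : String × List String) (ys : List (String × List String))
    (h : ys.Pairwise nlt) : (PySem.List.insertBy ltM x ys).Pairwise nlt := by
  induction ys with
  | nil => exact List.pairwise_singleton nlt x
  | cons y ys ih =>
    rw [insertBy_cons]
    rcases List.pairwise_cons.mp h with ⟨hy, hys⟩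
    by_cases hxy : ltM x y = true
    · simp only [hxy, if_pos]
      refine List.pairwise_cons.mpr ⟨?_, h⟩
      intro w hw
      rcases List.mem_cons.mp hw with rfl | hw
      · unfold nlt
        rw [ltM_iff] at hxy
        rw [ltM_eq_false_iff]
        omega
      · have h1 := hy w hw
        unfold nlt at *
        rw [ltM_iff] at hxy
        rw [ltM_eq_false_iff] at *
        omega
    · have hxy' : ltM x y = false := by simpa using hxy
      simp only [hxy', Bool.false_eq_true, if_false]
      refine List.pairwise_cons.mpr ⟨?_, ih hys⟩
      intro w hw
      rcases (PySem.List.mem_insertBy ltM x w ys).mp hw with rfl | hw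
      · exact hxy'
      · exact hy w hw

lemma pairwise_foldl_insertBy (xs init : List (String × List String)) (h : init.Pairwise nlt) :
    (xs.foldl (fun acc x => PySem.List.insertBy ltM x acc) init).Pairwise nlt := by
  induction xs generalizing init with
  | nil => exact h
  | cons x t ih => exact ih _ (pairwise_insertBy x init h)

lemma foldl_isSubseqStep_nil (long : List Char) (i : Nat) :
    long.foldl (isSubseqStep []) i = i := by
  induction long generalizing i with
  | nil => rfl
  | cons x l ih => simpa [isSubseqStep] using ih i

set_option maxRecDepth 4096 in
lemma foldl_isSubseqStep_shift (long : List Char) : ∀ (short : List Char) (i : Nat),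
    i ≤ short.length →
    long.foldl (isSubseqStep short) i = i + long.foldl (isSubseqStep (short.drop i)) 0 := by
  induction long with
  | nil => intro short i h; simp
  | cons x l ih =>
    intro short i h
    by_cases hi : i < short.length
    · have hdrop : short.drop i = short.getD i ' ' :: short.drop (i + 1) := by
        rw [List.drop_eq_getElem_cons hi]; congr 1; exact List.getElem_eq_getD ' '
      by_cases hx : x = short.getD i ' '
      · have l1 : (x :: l).foldl (isSubseqStep short) i = l.foldl (isSubseqStep short) (i + 1) := by
          rw [List.foldl_cons]; congr 1
          rw [isSubseqStep, if_pos ⟨hi, hx⟩]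
        have l2 : (x :: l).foldl (isSubseqStep (short.drop i)) 0
            = l.foldl (isSubseqStep (short.drop i)) 1 := by
          rw [List.foldl_cons]; congr 1
          rw [hdrop, isSubseqStep, if_pos (by simp [hx])]
        rw [l1, l2, ih short (i + 1) hi, ih (short.drop i) 1 (by simp [hdrop]),
          List.drop_drop]
        omega
      · have l1 : (x :: l).foldl (isSubseqStep short) i = l.foldl (isSubseqStep short) i := by
          rw [List.foldl_cons]; congr 1
          rw [isSubseqStep, if_neg (by intro hc; exact hx hc.2)]
        have l2 : (x :: l).foldl (isSubseqStep (short.drop i)) 0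
            = l.foldl (isSubseqStep (short.drop i)) 0 := by
          rw [List.foldl_cons]; congr 1
          rw [hdrop, isSubseqStep, if_neg (by simpa [List.getD] using hx)]
        rw [l1, l2, ih short i h]
    · have hie : i = short.length := by omega
      subst hie
      have l1 : (x :: l).foldl (isSubseqStep short) short.length
          = l.foldl (isSubseqStep short) short.length := by
        rw [List.foldl_cons]; congr 1
        rw [isSubseqStep, if_neg (by intro hc; omega)]
      have l2 : (x :: l).foldl (isSubseqStep (short.drop short.length)) 0
          = l.foldl (isSubseqStep (short.drop short.length)) 0 := by
        rw [List.foldl_cons]; congr 1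
        rw [List.drop_length, isSubseqStep, if_neg (by intro hc; simp at hc)]
      rw [l1, l2, ih short short.length le_rfl]

lemma isSubseq_eq_isSublist (long short : List Char) :
    isSubseq short long = short.isSublist long := by
  induction long generalizing short with
  | nil =>
    cases short with
    | nil => rfl
    | cons a t => simp [isSubseq, List.isSublist]
  | cons x l ih =>
    cases short with
    | nil =>
      simp [isSubseq, List.isSublist, isSubseqStep, foldl_isSubseqStep_nil]
    | cons a t =>
      by_cases hx : x = a
      · subst hx
        have hstep : isSubseqStep (x :: t) 0 x = 1 := by simp [isSubseqStep]
        have : (x :: l).foldl (isSubseqStep (x :: t)) 0 = l.foldl (isSubseqStep (x :: t)) 1 := by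
          simp [List.foldl_cons, hstep]
        rw [isSubseq, this, foldl_isSubseqStep_shift l (x :: t) 1 (by simp)]
        simp only [List.drop_one, List.tail_cons, List.isSublist, beq_self_eq_true, if_pos]
        rw [← ih t]
        simp [isSubseq]
        omega
      · have hstep : isSubseqStep (a :: t) 0 x = 0 := by simp [isSubseqStep, hx]
        have : (x :: l).foldl (isSubseqStep (a :: t)) 0 = l.foldl (isSubseqStep (a :: t)) 0 := by
          simp [List.foldl_cons, hstep]
        rw [isSubseq, this, ← isSubseq, ih]
        simp only [List.isSublist]
        have : (a == x) = false := by simp [Ne.symm hx]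
        simp [this]

lemma subseqB_eq_isSublist (s l : List Char) : subseqB s l = s.isSublist l := by
  induction l generalizing s with
  | nil => cases s <;> simp [subseqB, List.isSublist]
  | cons b l ih =>
    cases s with
    | nil => simp [subseqB, List.isSublist]
    | cons a s' =>
      by_cases h : b = a
      · subst h
        simp [subseqB, List.isSublist, ih]
      · have hba : (a == b) = false := by simp [Ne.symm h]
        simp [subseqB, List.isSublist, h, hba, ih]

lemma coversB_eq_dominates (n m : String × List String) :
    coversB n m = dominates n m := by
  unfold coversB dominates
  by_cases h : m.2.length ≤ n.2.length ∧ m.1.toList.length < n.1.toList.length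
  · rw [if_pos h, subseqB_eq_isSublist, ← isSubseq_eq_isSublist,
      decide_eq_true h.1, decide_eq_true h.2]
    simp
  · rw [if_neg h]
    rcases Decidable.not_and_iff_or_not.mp h with h1 | h1 <;>
      rw [decide_eq_false h1] <;> simp

lemma isSubseq_trans {a b c : List Char} (h1 : isSubseq a b = true) (h2 : isSubseq b c = true) :
    isSubseq a c = true := by
  rw [isSubseq_eq_isSublist, List.isSublist_iff_sublist] at *
  exact h1.trans h2

lemma dominates_trans {n' n m : String × List String}
    (h1 : dominates n' n = true) (h2 : dominates n m = true) : dominates n' m = true := by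
  simp only [dominates, Bool.and_eq_true, decide_eq_true_eq] at *
  exact ⟨⟨le_trans h2.1.1 h1.1.1, lt_trans h2.1.2 h1.1.2⟩, isSubseq_trans h2.2 h1.2⟩

lemma dominates_ltM {n m : String × List String} (h : dominates n m = true) :
    ltM n m = true := by
  simp only [dominates, Bool.and_eq_true, decide_eq_true_eq] at h
  rw [ltM_iff]
  omega

lemma exists_max {α : Type} (l : List α) (f : α → Nat)
    (h : l ≠ []) : ∃ a ∈ l, ∀ b ∈ l, f b ≤ f a := by
  induction l with
  | nil => exact absurd rfl h
  | cons x t ih =>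
    cases t with
    | nil =>
      refine ⟨x, List.mem_singleton_self x, ?_⟩
      intro b hb
      rw [List.mem_singleton] at hb
      subst hb; exact le_rfl
    | cons y s =>
      obtain ⟨a, ha, hmax⟩ := ih (by simp)
      by_cases hc : f a ≤ f x
      · refine ⟨x, List.mem_cons_self, ?_⟩
        intro b hb
        rcases List.mem_cons.mp hb with rfl | hb
        · exact le_rfl
        · exact le_trans (hmax b hb) hc
      · refine ⟨a, List.mem_cons_of_mem _ ha, ?_⟩
        intro b hb
        rcases List.mem_cons.mp hb with rfl | hb
        · omega
        · exact hmax b hb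

lemma any_keep_eq (S P Q : List (String × List String)) (m : String × List String)
    (hS : S = P ++ m :: Q) (hp : S.Pairwise nlt) :
    ((P.filter (good S)).any (fun n => dominates n m)) = (S.any (fun n => dominates n m)) := by
  rw [Bool.eq_iff_iff]
  simp only [List.any_eq_true, List.mem_filter]
  constructor
  · rintro ⟨n, ⟨hnP, _⟩, hd⟩
    exact ⟨n, by rw [hS]; exact List.mem_append_left _ hnP, hd⟩
  · rintro ⟨n0, hn0S, hd0⟩
    have hTne : S.filter (fun n => dominates n m) ≠ [] := by
      intro hnil
      have hmem : n0 ∈ S.filter (fun n => dominates n m) := List.mem_filter.mpr ⟨hn0S, hd0⟩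
      rw [hnil] at hmem
      cases hmem
    obtain ⟨a, haT, hmax⟩ := exists_max _ (fun n => n.1.toList.length) hTne
    have haS : a ∈ S := (List.mem_filter.mp haT).1
    have had : dominates a m = true := (List.mem_filter.mp haT).2
    have hgood : good S a = true := by
      have hall : ∀ n ∈ S, ¬ (dominates n a = true) := by
        intro n hn hdn
        have hdm : dominates n m = true := dominates_trans hdn had
        have hle := hmax n (List.mem_filter.mpr ⟨hn, hdm⟩)
        have hgt : a.1.toList.length < n.1.toList.length := by
          simp only [dominates, Bool.and_eq_true, decide_eq_true_eq] at hdn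
          exact hdn.1.2
        omega
      simp only [good, Bool.not_eq_true']
      exact List.any_eq_false.mpr hall
    have hlt : ltM a m = true := dominates_ltM had
    have haP : a ∈ P := by
      rw [hS] at haS hp
      rcases List.mem_append.mp haS with hmem | hmem
      · exact hmem
      · exfalso
        rcases List.mem_cons.mp hmem with rfl | hq
        · rw [ltM_iff] at hlt; omega
        · have h2 := (List.pairwise_append.mp hp).2.1
          have hna := (List.pairwise_cons.mp h2).1 a hq
          unfold nlt at hna
          rw [hna] at hlt
          cases hlt
    exact ⟨a, ⟨haP, hgood⟩, had⟩

lemma loop_eq (S : List (String × List String)) (hp : S.Pairwise nlt) :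
    S.foldl (fun keep m => if keep.any (fun n => dominates n m) then keep else keep ++ [m]) []
      = S.filter (good S) := by
  have haux : ∀ (Q P : List (String × List String)), S = P ++ Q →
      Q.foldl (fun keep m => if keep.any (fun n => dominates n m) then keep else keep ++ [m])
        (P.filter (good S)) = S.filter (good S) := by
    intro Q
    induction Q with
    | nil => intro P hS; rw [hS, List.append_nil]; rfl
    | cons m Q' ih =>
      intro P hS
      rw [List.foldl_cons]
      have hany := any_keep_eq S P Q' m hS hp
      have hstep : (if (P.filter (good S)).any (fun n => dominates n m) then P.filter (good S)
          else P.filter (good S) ++ [m]) = (P ++ [m]).filter (good S) := by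
        rw [List.filter_append]
        by_cases hgm : S.any (fun n => dominates n m) = true
        · have hgmf : good S m = false := by simp [good, hgm]
          rw [hany, if_pos hgm]
          simp [List.filter, hgmf]
        · have hgmt : good S m = true := by
            simp only [good, Bool.not_eq_true']
            simpa using hgm
          have hcf : (P.filter (good S)).any (fun n => dominates n m) = false := by
            rw [hany]; simpa using hgm
          rw [hcf]
          simp [List.filter, hgmt]
      rw [hstep]
      exact ih (P ++ [m]) (by rw [hS, List.append_assoc]; rfl)
  have h0 : ([] : List (String × List String)) = List.filter (good S) [] := rfl
  rw [h0]
  exact haux S [] rfl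

-- ===== VERDICT (by name: the statement is the Claim_ definition above) =====
theorem filter_dominated_spec : Claim_equal_filter_dominated := by
  intro motifs _
  unfold Spec_filter_dominated filter_dominated filter_dominated_alt
  have hp : (PySem.List.sorted2 motifs (fun x => -(x.2.length : Int))
      (fun x => -(x.1.toList.length : Int))).Pairwise nlt := by
    rw [sorted2_eq]
    exact pairwise_foldl_insertBy _ _ (List.Pairwise.nil)
  simpa [good, coversB_eq_dominates] using loop_eq _ hp
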